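-- pv_equiv track=rewrite | github.com/IROCX/InterviewCodingQuestionsPractice | Day 42 - bitwiseANDOfArray.py | count
-- ===== SOURCE A (Python) =====
-- def count(N, A, X):
--     # code here
--     m1 = m2 = 0
--     res = N
--     for i in range(30, -1, -1):
--         if (X >> i) & 1:
--             m1 ^= 1 << i
--             continue
--         count = 0
--         m2 = m1 ^ (1 << i)
--         for j in A:
--             if j & m2 == m2:
--                 count += 1
--
--         res = min(res, N-count)
--     return res
-- ===== SOURCE B (Python) =====
-- def count(N, A, X):
--     # Element-centric algorithm: for each element j, one bit_length computation
--     # finds the highest bit (<= 30) that X needs but j lacks; j then supports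
--     # exactly the zero bits of X at or above that position where j has a one.
--     # Those positions form one mask per element; per-position tallies of the
--     # masks give the largest keepable subset, and the answer is N minus the
--     # maximum tally.
--     M = (1 << 31) - 1
--     contribs = []
--     for j in A:
--         missing = X & ~j & M        # set bits of X (positions 0..30) absent from j
--         s = missing.bit_length()
--         cut = s - 1 if s else 0     # lowest position from which j can support
--         y = j & ~X & M              # zero bits of X where j has a one
--         contribs.append(y >> cut << cut)
--     counts = [sum((c >> i) & 1 for c in contribs) for i in range(31)]
--     return N - max(counts)
-- ===== Notes on version B (the rewrite author's own statement) =====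
-- stated objective: alternative
-- what changed: Instead of scanning A once per zero bit of X with a mask-containment test, B processes each element once: a bit_length computation finds the highest bit X needs but the element lacks, arithmetic turns that into a per-element mask of supported positions, and per-position tallies of those masks give the answer as N minus their maximum.
import Mathlib
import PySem

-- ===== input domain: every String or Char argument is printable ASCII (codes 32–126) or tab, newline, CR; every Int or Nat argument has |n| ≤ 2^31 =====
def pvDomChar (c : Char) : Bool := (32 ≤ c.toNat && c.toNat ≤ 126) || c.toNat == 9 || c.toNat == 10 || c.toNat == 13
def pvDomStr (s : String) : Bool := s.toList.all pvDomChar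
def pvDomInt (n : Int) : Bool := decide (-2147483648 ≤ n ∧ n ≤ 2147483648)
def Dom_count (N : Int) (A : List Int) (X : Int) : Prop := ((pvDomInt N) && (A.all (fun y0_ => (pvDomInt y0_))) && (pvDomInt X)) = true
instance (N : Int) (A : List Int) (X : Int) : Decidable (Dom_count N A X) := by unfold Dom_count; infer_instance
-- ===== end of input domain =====

-- B replaces A's per-zero-bit rescans of A (mask-containment test per candidate mask) by an
-- element-centric pass: per element a bit_length computation yields a single mask of supported
-- positions, per-position tallies of those masks are summed, and the answer is N minus their
-- maximum — an alternative algorithm of the same cost.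

-- ===== PORT A =====
-- Python's '(X >> i) & 1' truthiness test and '1 << i' (i ∈ [0,30] in A's loop, so i.toNat is exact)
def pvBit (X i : Int) : Bool := PySem.Int.band (X >>> i.toNat) 1 == 1
def pvShl1 (i : Int) : Int := (1 : Int) <<< i.toNat

-- literal port: outer loop over range(30,-1,-1) with state (m1, res); inner loop counts j & m2 == m2.
def count (N : Int) (A : List Int) (X : Int) : Int :=
  (((PySem.List.pyRange 30 (-1) (-1)).foldl (fun (s : Int × Int) i =>
      if pvBit X i then
        (PySem.Int.bxor s.1 (pvShl1 i), s.2)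
      else
        let m2 := PySem.Int.bxor s.1 (pvShl1 i)
        let c := A.foldl (fun c j => if PySem.Int.band j m2 == m2 then c + 1 else c) (0 : Int)
        (s.1, min s.2 (N - c)))
    ((0 : Int), N)).2)

-- ===== PORT B =====
-- literal port of Source B: one pass over A computes each element's support mask via bit_length,
-- then 31 per-position tallies are taken and the maximum subtracted from N.
def count_alt (N : Int) (A : List Int) (X : Int) : Int :=
  let M : Int := (1 <<< 31) - 1
  let contribs := A.foldl (fun cs j =>
      let missing := PySem.Int.band (PySem.Int.band X (Int.not j)) M
      let s := PySem.Int.bitLength missing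
      let cut : Nat := if s ≠ 0 then s - 1 else 0
      let y := PySem.Int.band (PySem.Int.band j (Int.not X)) M
      cs ++ [(y >>> cut) <<< cut]) ([] : List Int)
  let counts := (PySem.List.pyRange 0 31 1).map (fun i =>
      (contribs.map (fun c : Int => PySem.Int.band (c >>> i.toNat) 1)).sum)
  -- counts always has 31 entries, so Python's max(counts) cannot raise and max? is never none
  N - ((PySem.List.max? counts (fun x => x)).getD 0)

-- ===== PRECONDITION & SPEC =====
def Spec_count (N : Int) (A : List Int) (X : Int) (out : Int) : Prop := out = count_alt N A X
instance (N : Int) (A : List Int) (X : Int) (out : Int) : Decidable (Spec_count N A X out) := by unfold Spec_count; infer_instance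

-- ===== CLAIM =====
def Claim_equal_count : Prop := ∀ (N : Int) (A : List Int) (X : Int), Dom_count N A X → Spec_count N A X (count N A X)

-- ===== LEMMAS AND PROOFS =====

theorem pvAndAddLdiff : ∀ m n : Nat, (m &&& n) + Nat.ldiff m n = m := by
  intro m
  induction m using Nat.strong_induction_on with
  | _ m ih =>
    intro n
    rcases Nat.eq_zero_or_pos m with h0 | hpos
    · subst h0
      have h1 : (0 &&& n) = 0 := Nat.zero_and n
      have h2 : Nat.ldiff 0 n = 0 := by
        apply Nat.eq_of_testBit_eq; intro i; simp [Nat.testBit_ldiff]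
      simp [h1, h2]
    · have hlt : m / 2 < m := Nat.div_lt_self hpos (by norm_num)
      have IH := ih (m / 2) hlt (n / 2)
      have ha2 : (m &&& n) / 2 = (m / 2) &&& (n / 2) := Nat.and_div_two
      have hl2 : Nat.ldiff m n / 2 = Nat.ldiff (m / 2) (n / 2) := by
        apply Nat.eq_of_testBit_eq; intro i
        simp [Nat.testBit_div_two, Nat.testBit_ldiff]
      have hb : (m &&& n) % 2 + Nat.ldiff m n % 2 = m % 2 := by
        have par : ∀ x : Nat, (x.testBit 0 = true → x % 2 = 1) ∧ (x.testBit 0 = false → x % 2 = 0) := by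
          intro x; rw [Nat.testBit_zero]
          rcases Nat.mod_two_eq_zero_or_one x with h | h <;> simp [h]
        have t1 : (m &&& n).testBit 0 = (m.testBit 0 && n.testBit 0) := Nat.testBit_and m n 0
        have t2 : (Nat.ldiff m n).testBit 0 = (m.testBit 0 && !n.testBit 0) := Nat.testBit_ldiff m n 0
        rcases hbm : m.testBit 0 with _ | _ <;> rcases hbn : n.testBit 0 with _ | _ <;>
          rw [hbm, hbn] at t1 t2 <;> simp only [Bool.and_false, Bool.and_true, Bool.not_false,
            Bool.not_true, Bool.and_self] at t1 t2 <;>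
          have := (par (m &&& n)) <;> have := (par (Nat.ldiff m n)) <;> have := (par m) <;>
          simp_all
      omega

theorem pvSubAnd (m n : Nat) : m - (m &&& n) = Nat.ldiff m n := by
  have := pvAndAddLdiff m n; omega

theorem pvBandEqLand (a b : Int) : PySem.Int.band a b = Int.land a b := by
  cases a with
  | ofNat m =>
    cases b with
    | ofNat n => simp [PySem.Int.band, Int.land]
    | negSucc n =>
      have h1 : ¬ (0:Int) ≤ Int.negSucc n := by exact of_decide_eq_false rfl
      simp [PySem.Int.band, Int.land, h1, pvSubAnd]
  | negSucc m =>
    cases b with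
    | ofNat n =>
      simp [PySem.Int.band, Int.land, pvSubAnd]
    | negSucc n =>
      have h1 : ¬ (0:Int) ≤ Int.negSucc m := of_decide_eq_false rfl
      have h2 : ¬ (0:Int) ≤ Int.negSucc n := of_decide_eq_false rfl
      simp only [PySem.Int.band, Int.land, h1, h2, if_false]
      have e1 : (-Int.negSucc m - 1).toNat = m := by
        rw [Int.negSucc_eq]; omega
      have e2 : (-Int.negSucc n - 1).toNat = n := by
        rw [Int.negSucc_eq]; omega
      rw [e1, e2, Int.negSucc_eq]
      ring

theorem pvNotEqLnot (a : Int) : Int.not a = Int.lnot a := by cases a <;> rfl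

theorem pvTestBitShiftRight (a : Int) (n k : Nat) : (a >>> n).testBit k = a.testBit (n + k) := by
  cases a with
  | ofNat m =>
    have e : Int.ofNat m >>> n = Int.ofNat (m >>> n) := rfl
    rw [e]; simp [Int.testBit, Nat.testBit_shiftRight]
  | negSucc m =>
    have e : Int.negSucc m >>> n = Int.negSucc (m >>> n) := rfl
    rw [e]; simp [Int.testBit, Nat.testBit_shiftRight]

theorem pvLandNonneg (j : Int) (m : Nat) : 0 ≤ Int.land j (↑m) := by
  cases j with
  | ofNat a => simp [Int.land]
  | negSucc a => simp [Int.land]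

theorem pvCastTestBit (m : Nat) (i : Nat) : ((m : Int)).testBit i = m.testBit i := rfl

theorem pvIntEqCast {a : Int} (ha : 0 ≤ a) (m : Nat) (h : ∀ i, a.testBit i = m.testBit i) : a = ↑m := by
  rw [← Int.toNat_of_nonneg ha]
  have : a.toNat = m := by
    apply Nat.eq_of_testBit_eq
    intro i
    have : a = ((a.toNat : Nat) : Int) := (Int.toNat_of_nonneg ha).symm
    rw [← pvCastTestBit a.toNat i, ← this, h]
  rw [this]

theorem pvLandEqCastIff (j : Int) (m : Nat) :
    (Int.land j ↑m = ↑m) ↔ (∀ i, m.testBit i = true → j.testBit i = true) := by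
  constructor
  · intro h i hm
    have := congrArg (fun z => z.testBit i) h
    simp only [Int.testBit_land, pvCastTestBit, hm, Bool.and_true] at this
    exact this
  · intro h
    apply pvIntEqCast (pvLandNonneg j m)
    intro i
    rw [Int.testBit_land, pvCastTestBit]
    rcases hm : m.testBit i with _ | _
    · simp
    · simp [h i hm]

theorem pvBandOne (a : Int) : PySem.Int.band a 1 = if a.testBit 0 then 1 else 0 := by
  rw [pvBandEqLand]
  cases a with
  | ofNat m =>
    have e : Int.land (Int.ofNat m) 1 = ↑(m &&& 1) := rfl
    rw [e, Nat.and_one_is_mod]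
    have : (Int.ofNat m).testBit 0 = m.testBit 0 := rfl
    rw [this, Nat.testBit_zero]
    rcases Nat.mod_two_eq_zero_or_one m with h | h <;> simp [h]
  | negSucc m =>
    have e : Int.land (Int.negSucc m) 1 = ↑(Nat.ldiff 1 m) := rfl
    rw [e]
    have ht : (Int.negSucc m).testBit 0 = !m.testBit 0 := rfl
    have hl : Nat.ldiff 1 m = if m.testBit 0 then 0 else 1 := by
      have h1s : ∀ i, Nat.testBit 1 (i + 1) = false := by
        intro i
        rw [Nat.testBit_succ]
        simp
      rcases hb : m.testBit 0 with _ | _ <;>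
        [skip; skip] <;> apply Nat.eq_of_testBit_eq <;> intro i <;>
        · rcases i with _ | i
          · rw [Nat.testBit_ldiff, hb]; decide
          · rw [Nat.testBit_ldiff, h1s i]; simp [h1s]
    rw [ht, hl]
    rcases hb : m.testBit 0 with _ | _ <;> simp

theorem pvTestExpr (X : Int) (n : Nat) : (PySem.Int.band (X >>> n) 1 == 1) = X.testBit n := by
  rw [pvBandOne]
  have h : (X >>> n).testBit 0 = X.testBit n := by
    rw [pvTestBitShiftRight]
    norm_num
  rw [h]
  rcases X.testBit n with _ | _ <;> simp

def pvM : Nat := 2 ^ 31 - 1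

def pvXm (X : Int) : Nat := (Int.land X ↑pvM).toNat

theorem pvXm_testBit (X : Int) (i : Nat) :
    (pvXm X).testBit i = (X.testBit i && decide (i < 31)) := by
  have hnn : 0 ≤ Int.land X ↑pvM := pvLandNonneg X pvM
  have e : ((pvXm X : Nat) : Int) = Int.land X ↑pvM := Int.toNat_of_nonneg hnn
  rw [← pvCastTestBit, e, Int.testBit_land, pvCastTestBit]
  show _ = (X.testBit i && decide (i < 31))
  congr 1
  exact Nat.testBit_two_pow_sub_one 31 i

def pvHi (X : Int) (n : Nat) : Nat := ((pvXm X) >>> n) <<< n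

theorem pvHi_testBit (X : Int) (n i : Nat) :
    (pvHi X n).testBit i = (decide (n ≤ i) && X.testBit i && decide (i < 31)) := by
  unfold pvHi
  rw [Nat.testBit_shiftLeft]
  by_cases h : n ≤ i
  · have : n + (i - n) = i := by omega
    rw [Nat.testBit_shiftRight, this, pvXm_testBit]
    simp [h]
  · simp [h]

def pvSupp (X j : Int) (k : Nat) : Bool :=
  !X.testBit k && j.testBit k &&
    (List.range 31).all fun i => !decide (k < i) || !X.testBit i || j.testBit i

theorem pvSupp_iff (X j : Int) (k : Nat) : pvSupp X j k = true ↔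
    (X.testBit k = false ∧ j.testBit k = true ∧
      ∀ i, i < 31 → k < i → X.testBit i = true → j.testBit i = true) := by
  unfold pvSupp
  rw [Bool.and_eq_true, Bool.and_eq_true, List.all_eq_true]
  constructor
  · rintro ⟨⟨h1, h2⟩, h3⟩
    refine ⟨by simpa using h1, h2, ?_⟩
    intro i hi hki hxi
    have h := h3 i (List.mem_range.mpr hi)
    rcases hj : j.testBit i with _ | _
    · rw [hj, hxi, decide_eq_true hki] at h
      simp at h
    · rfl
  · rintro ⟨h1, h2, h3⟩
    refine ⟨⟨by simp [h1], h2⟩, ?_⟩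
    intro i hmem
    have hi := List.mem_range.mp hmem
    by_cases hki : k < i
    · rcases hx : X.testBit i with _ | _
      · simp
      · simp [h3 i hi hki hx]
    · simp [hki]

theorem pvMatchA (X j : Int) (k : Nat) (_hk : k < 31) (hx : X.testBit k = false) :
    (PySem.Int.band j ↑(pvHi X (k + 1) ^^^ 2 ^ k) == ↑(pvHi X (k + 1) ^^^ 2 ^ k))
      = pvSupp X j k := by
  rw [pvBandEqLand]
  have hm2 : ∀ i, (pvHi X (k + 1) ^^^ 2 ^ k).testBit i
      = ((decide (k + 1 ≤ i) && X.testBit i && decide (i < 31)) ^^ decide (k = i)) := by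
    intro i
    rw [Nat.testBit_xor, pvHi_testBit, Nat.testBit_two_pow]
  rcases hb : (Int.land j ↑(pvHi X (k + 1) ^^^ 2 ^ k) == ↑(pvHi X (k + 1) ^^^ 2 ^ k)) with _ | _
  · -- band test false: supp must be false
    symm
    rw [Bool.eq_false_iff]
    intro hs
    rw [beq_eq_false_iff_ne] at hb
    apply hb
    rw [pvLandEqCastIff]
    intro i hi
    rw [hm2 i] at hi
    rw [pvSupp_iff] at hs
    obtain ⟨hx0, hj0, hall⟩ := hs
    by_cases hik : k = i
    · subst hik; exact hj0
    · simp only [decide_eq_false hik, Bool.xor_false] at hi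
      simp only [Bool.and_eq_true, decide_eq_true_eq] at hi
      exact hall i hi.2 (by omega) hi.1.2
  · -- band test true: supp holds
    symm
    rw [beq_iff_eq, pvLandEqCastIff] at hb
    rw [pvSupp_iff]
    refine ⟨hx, ?_, ?_⟩
    · apply hb
      rw [hm2 k]
      simp [hx]
    · intro i hi31 hki hxi
      apply hb
      rw [hm2 i]
      have h1 : ¬ (k = i) := by omega
      have h2 : k + 1 ≤ i := by omega
      simp [h1, h2, hxi, hi31]

def pvContrib (X j : Int) : Int :=
  let M : Int := (1 <<< 31) - 1
  let missing := PySem.Int.band (PySem.Int.band X (Int.not j)) M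
  let s := PySem.Int.bitLength missing
  let cut : Nat := if s ≠ 0 then s - 1 else 0
  let y := PySem.Int.band (PySem.Int.band j (Int.not X)) M
  (y >>> cut) <<< cut

theorem pvMIntCast : ((1 <<< 31 : Nat) : Int) - 1 = (↑pvM : Int) := by decide

theorem pvMaskBits (a b : Int) (i : Nat) :
    (Int.land (Int.land a (Int.lnot b)) ↑pvM).toNat.testBit i
      = (a.testBit i && !b.testBit i && decide (i < 31)) := by
  have hnn : 0 ≤ Int.land (Int.land a (Int.lnot b)) ↑pvM := pvLandNonneg _ pvM
  have e : (((Int.land (Int.land a (Int.lnot b)) ↑pvM).toNat : Nat) : Int)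
      = Int.land (Int.land a (Int.lnot b)) ↑pvM := Int.toNat_of_nonneg hnn
  rw [← pvCastTestBit, e, Int.testBit_land, Int.testBit_land, Int.testBit_lnot, pvCastTestBit]
  show _ = (a.testBit i && !b.testBit i && decide (i < 31))
  congr 1
  exact Nat.testBit_two_pow_sub_one 31 i

theorem pvContrib_testBit (X j : Int) (k : Nat) (hk : k < 31) :
    (pvContrib X j).testBit k = pvSupp X j k := by
  unfold pvContrib
  dsimp only
  rw [pvMIntCast]
  simp only [pvBandEqLand, pvNotEqLnot]
  set mI := Int.land (Int.land X (Int.lnot j)) ↑pvM with hmI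
  set yI := Int.land (Int.land j (Int.lnot X)) ↑pvM with hyI
  have hmnn : 0 ≤ mI := pvLandNonneg _ pvM
  have hynn : 0 ≤ yI := pvLandNonneg _ pvM
  set mN := mI.toNat with hmN
  set yN := yI.toNat with hyN
  have hmBits : ∀ i, mN.testBit i = (X.testBit i && !j.testBit i && decide (i < 31)) :=
    fun i => pvMaskBits X j i
  have hyBits : ∀ i, yN.testBit i = (j.testBit i && !X.testBit i && decide (i < 31)) :=
    fun i => pvMaskBits j X i
  set s := PySem.Int.bitLength mI with hs
  set cut : Nat := if s ≠ 0 then s - 1 else 0 with hcut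
  -- the shifted value is a Nat cast
  have eyI : yI = (↑yN : Int) := (Int.toNat_of_nonneg hynn).symm
  have eshift : (yI >>> cut) <<< cut = ((yN >>> cut) <<< cut : Nat) := by
    rw [eyI]; rfl
  rw [eshift, pvCastTestBit, Nat.testBit_shiftLeft]
  -- bitLength facts
  have habs : mI.natAbs = mN := by omega
  have hmlt : mN < 2 ^ s := by
    have := PySem.Int.lt_two_pow_bitLength mI
    rwa [habs] at this
  have hs31 : s ≤ 31 := by
    by_contra hgt
    have hne : mI ≠ 0 := by
      intro h0
      rw [h0] at hs
      simp [PySem.Int.bitLength, PySem.Int.bitLengthAux] at hs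
      omega
    have hle := PySem.Int.two_pow_bitLength_le mI hne
    rw [habs, ← hs] at hle
    have hm31 : mN < 2 ^ 31 := by
      apply Nat.lt_pow_two_of_testBit
      intro i hi
      rw [hmBits i]
      have : ¬ i < 31 := by omega
      simp [this]
    have : (2 : Nat) ^ 31 ≤ 2 ^ (s - 1) := Nat.pow_le_pow_right (by norm_num) (by omega)
    omega
  by_cases hck : cut ≤ k
  · -- bit k of contrib = yN bit k; show equal to supp
    have : k - cut + cut = k := by omega
    rw [Nat.testBit_shiftRight]
    rw [decide_eq_true (by omega : k ≥ cut)]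
    rw [(by omega : cut + (k - cut) = k), hyBits k, Bool.true_and]
    rw [decide_eq_true hk, Bool.and_true]
    -- show (j.testBit k && !X.testBit k) = pvSupp X j k, using cut ≤ k
    have hsk1 : s ≤ k + 1 := by
      rcases Nat.eq_zero_or_pos s with h0 | hpos
      · omega
      · have : cut = s - 1 := by
          have : s ≠ 0 := by omega
          simp [hcut, this]
        omega
    rcases hsp : pvSupp X j k with _ | _
    · -- supp false: show j_k && !X_k is false
      rcases hjk : j.testBit k with _ | _
      · simp
      rcases hxk : X.testBit k with _ | _
      · exfalso
        have hC : ∀ i, i < 31 → k < i → X.testBit i = true → j.testBit i = true := by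
          intro i hi hki hxi
          by_contra hji
          rw [Bool.not_eq_true] at hji
          have hbit : mN.testBit i = true := by
            rw [hmBits i, hxi, hji]
            simp [hi]
          have : mN < 2 ^ i := by
            calc mN < 2 ^ s := hmlt
            _ ≤ 2 ^ i := Nat.pow_le_pow_right (by norm_num) (by omega)
          rw [Nat.testBit_lt_two_pow this] at hbit
          cases hbit
        have := pvSupp_iff X j k |>.mpr ⟨hxk, hjk, hC⟩
        rw [hsp] at this
        cases this
      · simp
    · rw [pvSupp_iff] at hsp
      obtain ⟨h1, h2, _⟩ := hsp
      simp [h1, h2]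
  · -- cut > k: supp is false because some needed bit above k is missing
    have hsne : s ≠ 0 := by
      intro h0; rw [hcut] at hck; simp [h0] at hck
    have hcut1 : cut = s - 1 := by simp [hcut, hsne]
    have hne : mI ≠ 0 := by
      intro h0
      rw [h0] at hs
      simp [PySem.Int.bitLength, PySem.Int.bitLengthAux] at hs
      omega
    have hle := PySem.Int.two_pow_bitLength_le mI hne
    rw [habs, ← hs] at hle
    -- top bit of mN is at s-1
    have htop : mN.testBit (s - 1) = true := by
      have hpow : (2 : Nat) ^ s = 2 ^ (s - 1) * 2 := by
        have hs1 : s - 1 + 1 = s := by omega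
        conv_lhs => rw [← hs1]
        exact pow_succ 2 (s - 1)
      have hdiv : mN / 2 ^ (s - 1) = 1 := by
        apply Nat.div_eq_of_lt_le
        · simpa using hle
        · rw [(by ring : (1 + 1) * 2 ^ (s - 1) = 2 ^ (s - 1) * 2), ← hpow]
          exact hmlt
      rw [Nat.testBit_eq_decide_div_mod_eq, hdiv]
      rfl
    -- cut > k, so position s-1 witnesses a missing bit above k: supp is false
    rw [decide_eq_false (by omega : ¬ k ≥ cut), Bool.false_and]
    symm
    rw [Bool.eq_false_iff]
    intro hsp
    rw [pvSupp_iff] at hsp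
    obtain ⟨_, _, hC⟩ := hsp
    rw [hmBits (s - 1)] at htop
    have hi31 : s - 1 < 31 := by omega
    have hki : k < s - 1 := by omega
    rcases hxb : X.testBit (s - 1) with _ | _ <;> rw [hxb] at htop
    · simp at htop
    · rcases hjb : j.testBit (s - 1) with _ | _ <;> rw [hjb] at htop
      · have := hC (s - 1) hi31 hki hxb
        rw [hjb] at this
        cases this
      · simp at htop

def pvCnt (X : Int) (A : List Int) (k : Nat) : Nat := A.countP (fun j => pvSupp X j k)

def pvBest (X : Int) (A : List Int) (n : Nat) : Nat :=
  (List.range n).foldl (fun b k => max b (pvCnt X A k)) 0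

theorem pvBest_succ (X : Int) (A : List Int) (n : Nat) :
    pvBest X A (n + 1) = max (pvBest X A n) (pvCnt X A n) := by
  unfold pvBest
  rw [List.range_succ, List.foldl_append]
  rfl

theorem pvHi_xor_set (X : Int) (n : Nat) (hn : n < 31) (hx : X.testBit n = true) :
    pvHi X (n + 1) ^^^ 2 ^ n = pvHi X n := by
  apply Nat.eq_of_testBit_eq
  intro i
  rw [Nat.testBit_xor, pvHi_testBit, pvHi_testBit, Nat.testBit_two_pow]
  by_cases h : n = i
  · subst h
    simp [hx, hn]
  · have hd : decide (n + 1 ≤ i) = decide (n ≤ i) := decide_eq_decide.mpr (by omega)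
    rw [hd]
    simp [h]

theorem pvHi_zero_bit (X : Int) (n : Nat) (hx : X.testBit n = false) :
    pvHi X (n + 1) = pvHi X n := by
  apply Nat.eq_of_testBit_eq
  intro i
  rw [pvHi_testBit, pvHi_testBit]
  by_cases h : n = i
  · subst h
    simp [hx]
  · have hd : decide (n + 1 ≤ i) = decide (n ≤ i) := decide_eq_decide.mpr (by omega)
    rw [hd]

theorem pvHi_31 (X : Int) : pvHi X 31 = 0 := by
  apply Nat.eq_of_testBit_eq
  intro i
  rw [pvHi_testBit]
  by_cases h : 31 ≤ i <;> simp [h]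


theorem pvCnt_set_bit (X : Int) (A : List Int) (k : Nat) (hx : X.testBit k = true) :
    pvCnt X A k = 0 := by
  unfold pvCnt
  rw [List.countP_eq_zero]
  intro j _
  simp [pvSupp, hx]

theorem pvShl1_cast (n : Nat) : pvShl1 (↑n) = ((2 ^ n : Nat) : Int) := by
  unfold pvShl1
  rw [Int.toNat_natCast]
  show Int.ofNat (1 <<< n) = _
  rw [Nat.one_shiftLeft]
  rfl

-- A's outer loop, counted down from index n-1, starting from accumulated mask pvHi X n
theorem pvALoop (N X : Int) (A : List Int) :
    ∀ (n : Nat), n ≤ 31 → ∀ r : Int, r ≤ N →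
    ((PySem.List.pyRange ((n : Int) - 1) (-1) (-1)).foldl (fun (s : Int × Int) i =>
      if pvBit X i then
        (PySem.Int.bxor s.1 (pvShl1 i), s.2)
      else
        let m2 := PySem.Int.bxor s.1 (pvShl1 i)
        let c := A.foldl (fun c j => if PySem.Int.band j m2 == m2 then c + 1 else c) (0 : Int)
        (s.1, min s.2 (N - c)))
      ((↑(pvHi X n) : Int), r))
    = ((↑(pvHi X 0) : Int), min r (N - ↑(pvBest X A n))) := by
  intro n
  induction n with
  | zero =>
    intro _ r hr
    rw [PySem.List.pyRange_neg_one_eq_nil (by norm_num)]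
    simp only [List.foldl_nil, pvBest, List.range_zero, List.foldl_nil]
    congr 1
    omega
  | succ n ih =>
    intro hn r hr
    have hcast : ((↑(n + 1) : Int) - 1) = (n : Int) := by push_cast; ring
    rw [hcast, PySem.List.pyRange_neg_one_cons (by omega : (-1 : Int) < ↑n), List.foldl_cons]
    have htest : pvBit X ↑n = X.testBit n := by
      unfold pvBit
      rw [Int.toNat_natCast]
      exact pvTestExpr X n
    have hxor : PySem.Int.bxor (↑(pvHi X (n + 1)) : Int) (pvShl1 ↑n)
        = ((pvHi X (n + 1) ^^^ 2 ^ n : Nat) : Int) := by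
      rw [pvShl1_cast, PySem.Int.bxor_of_nonneg (by positivity) (by positivity),
        Int.toNat_natCast, Int.toNat_natCast]
    rcases hx : X.testBit n with _ | _
    · -- zero bit of X: the inner scan runs
      rw [htest, hx]
      simp only [Bool.false_eq_true, if_false]
      have hcnt : A.foldl (fun c j =>
          if PySem.Int.band j (PySem.Int.bxor (↑(pvHi X (n + 1)) : Int) (pvShl1 ↑n))
              == PySem.Int.bxor (↑(pvHi X (n + 1)) : Int) (pvShl1 ↑n) then c + 1 else c) (0 : Int)
          = ((pvCnt X A n : Nat) : Int) := by
        rw [hxor, PySem.List.foldl_if_add_one, Int.zero_add]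
        unfold pvCnt
        congr 1
        apply List.countP_congr
        intro j _
        rw [pvMatchA X j n (by omega) hx]
      rw [hcnt]
      have hrw : ((pvHi X (n + 1) : Nat) : Int) = ((pvHi X n : Nat) : Int) := by
        rw [pvHi_zero_bit X n hx]
      rw [hrw, ih (by omega) (min r (N - ↑(pvCnt X A n))) (by omega), pvBest_succ]
      have hcast2 : ((max (pvBest X A n) (pvCnt X A n) : Nat) : Int)
          = max ((pvBest X A n : Nat) : Int) ((pvCnt X A n : Nat) : Int) := by
        push_cast; rfl
      rw [hcast2]
      congr 1
      omega
    · -- set bit of X: only the mask accumulator changes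
      rw [htest, hx]
      simp only [if_true]
      rw [hxor, pvHi_xor_set X n (by omega) hx, ih (by omega) r hr, pvBest_succ,
        pvCnt_set_bit X A n hx]
      simp

theorem pvShiftRightCast (c : Int) (n : Nat) : c >>> ((n : Nat) : Int) = c >>> n := by
  cases c with
  | ofNat m =>
    show ((m : Nat) : Int) >>> ((n : Nat) : Int) = _
    rw [Int.shiftRight_natCast]
    rfl
  | negSucc m =>
    rw [Int.shiftRight_negSucc]
    rfl

theorem pvBandOneShift (c : Int) (k : Nat) :
    PySem.Int.band (c >>> k) 1 = if c.testBit k then 1 else 0 := by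
  rw [pvBandOne]
  have h : (c >>> k).testBit 0 = c.testBit k := by
    rw [pvTestBitShiftRight]
    norm_num
  rw [h]

theorem pvFoldStep (g : Option Int → Int → Option Int)
    (hg : ∀ m x, g (some m) x = if m < x then some x else some m) :
    ∀ (vs : List Int) (b : Int),
      List.foldl g (some b) vs = some (vs.foldl (fun a c => max a c) b) := by
  intro vs
  induction vs with
  | nil => intro b; rfl
  | cons v vs ih =>
    intro b
    rw [List.foldl_cons, List.foldl_cons, hg]
    by_cases h : b < v
    · rw [if_pos h, ih, (show max b v = v by omega)]
    · rw [if_neg h, ih, (show max b v = b by omega)]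

theorem pvCastFoldMax (X : Int) (A : List Int) :
    ∀ (ks : List Nat) (b : Nat),
      ((ks.map fun k => ((pvCnt X A k : Nat) : Int)).foldl (fun a c => max a c) ((b : Nat) : Int))
        = ((ks.foldl (fun a k => max a (pvCnt X A k)) b : Nat) : Int) := by
  intro ks
  induction ks with
  | nil => intro b; rfl
  | cons k ks ih =>
    intro b
    rw [List.map_cons, List.foldl_cons, List.foldl_cons, ← Nat.cast_max, ih]

theorem pvBEval (N X : Int) (A : List Int) :
    count_alt N A X = N - ((pvBest X A 31 : Nat) : Int) := by
  have h1 : count_alt N A X = N - ((PySem.List.max?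
      ((PySem.List.pyRange 0 31 1).map (fun i =>
        ((A.map (fun j => pvContrib X j)).map (fun c : Int => PySem.Int.band (c >>> i.toNat) 1)).sum))
      (fun x => x)).getD 0) := by
    unfold count_alt
    dsimp only
    rw [PySem.List.foldl_append_singleton_eq_map]
    rfl
  rw [h1]
  have h3 : (PySem.List.pyRange 0 31 1) = (List.range 31).map (fun k => ((k : Nat) : Int)) := by
    rw [PySem.List.pyRange_one]
    simp
  have h4 : ((PySem.List.pyRange 0 31 1).map (fun i =>
        ((A.map (fun j => pvContrib X j)).map (fun c : Int => PySem.Int.band (c >>> i.toNat) 1)).sum))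
      = (List.range 31).map (fun k => ((pvCnt X A k : Nat) : Int)) := by
    rw [h3, List.map_map]
    apply List.map_congr_left
    intro k hk
    have hk31 : k < 31 := List.mem_range.mp hk
    simp only [Function.comp_def, Int.toNat_natCast, List.map_map, pvShiftRightCast, pvBandOneShift]
    have hsum : (A.map (fun j => if (pvContrib X j).testBit k then (1 : Int) else 0)).sum
        = ((pvCnt X A k : Nat) : Int) := by
      rw [List.map_congr_left (fun j _ => by rw [pvContrib_testBit X j k hk31]),
        PySem.List.sum_map_ite_one_zero]
      rfl
    exact hsum
  rw [h4]
  have hr : List.range 31 = 0 :: ((List.range 30).map Nat.succ) := by decide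
  have hbest : ((List.range 30).map Nat.succ).foldl (fun acc k => max acc (pvCnt X A k))
      (pvCnt X A 0) = pvBest X A 31 := by
    unfold pvBest
    rw [hr, List.foldl_cons, Nat.zero_max]
  have h5 : PySem.List.max? ((List.range 31).map (fun k => ((pvCnt X A k : Nat) : Int)))
      (fun x => x) = some ((pvBest X A 31 : Nat) : Int) := by
    unfold PySem.List.max?
    rw [hr, List.map_cons, List.foldl_cons]
    show List.foldl _ (some ((pvCnt X A 0 : Nat) : Int)) _ = _
    exact (pvFoldStep _ (fun m x => rfl) _ _).trans
      (by rw [pvCastFoldMax X A ((List.range 30).map Nat.succ) (pvCnt X A 0), hbest])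
  rw [h5]
  rfl

-- ===== VERDICT =====
theorem count_spec : Claim_equal_count := by
  intro N A X _
  unfold Spec_count count
  rw [(by norm_num : (30 : Int) = ((31 : Nat) : Int) - 1),
    (by rw [pvHi_31] ; rfl : (((0 : Int), N)) = (((pvHi X 31 : Nat) : Int), N)),
    pvALoop N X A 31 (by norm_num) N (le_refl N), pvBEval]
  have hb : (0 : Int) ≤ ((pvBest X A 31 : Nat) : Int) := by positivity
  show min N (N - ((pvBest X A 31 : Nat) : Int)) = _
  omega
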